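-- pv_equiv track=rewrite | github.com/IlyaStarkov/Botrade | work_on_OS.py | search_extension
-- ===== SOURCE A (Python) =====
-- extension = "xlsx"
--
-- def search_extension(list):
--     acc = 0
--     key = 0
--     for i in range(len(list)):
--         if list[i].find(extension) != -1:
--             acc+=1
--             key = i
--     return acc, key
-- ===== SOURCE B (Python) =====
-- extension = "xlsx"
--
-- def search_extension(list):
--     acc = sum(1 for x in list if x.find(extension) != -1)
--     key = next((i for i in reversed(range(len(list))) if list[i].find(extension) != -1), 0)
--     return acc, key
-- ===== Notes on version B (the rewrite author's own statement) =====
-- stated objective: alternative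
-- what changed: Replaces A's single index loop accumulating (count, last index) with two independent computations: a sum over elements for the count and a short-circuiting reversed-index scan for the last matching index.
import Mathlib
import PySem

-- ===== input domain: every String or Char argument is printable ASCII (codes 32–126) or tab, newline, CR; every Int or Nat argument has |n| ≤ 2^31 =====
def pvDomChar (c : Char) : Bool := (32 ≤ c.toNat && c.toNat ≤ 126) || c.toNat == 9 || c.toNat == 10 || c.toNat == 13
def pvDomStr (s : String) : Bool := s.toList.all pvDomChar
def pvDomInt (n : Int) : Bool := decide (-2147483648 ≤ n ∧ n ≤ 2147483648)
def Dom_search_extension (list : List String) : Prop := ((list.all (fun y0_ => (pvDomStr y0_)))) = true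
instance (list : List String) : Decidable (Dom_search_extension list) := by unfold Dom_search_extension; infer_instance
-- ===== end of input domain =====

-- B replaces A's single accumulating index loop by two independent computations (a count over the
-- elements and a short-circuiting reversed-index scan for the last match); objective: alternative.

-- ===== PORT A =====
-- one loop over indices, accumulating (acc, key)
def search_extension (list : List String) : Int × Int :=
  (PySem.List.pyRange 0 (list.length : Int) 1).foldl
    (fun (st : Int × Int) i =>
      if PySem.Str.find (PySem.List.pyGetD list i "") "xlsx" != -1 then (st.1 + 1, i) else st)
    (0, 0)

-- ===== PORT B =====
-- count = sum of 1 over matching elements; key = first matching index scanning indices in reverse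
def search_extension_alt (list : List String) : Int × Int :=
  let acc : Int := ((list.filter (fun x => PySem.Str.find x "xlsx" != -1)).length : Int)
  let key : Int :=
    ((PySem.List.pyRange 0 (list.length : Int) 1).reverse.find?
      (fun i => PySem.Str.find (PySem.List.pyGetD list i "") "xlsx" != -1)).getD 0
  (acc, key)

-- ===== PRECONDITION & SPEC =====
def Spec_search_extension (list : List String) (out : Int × Int) : Prop := out = search_extension_alt list
instance (list : List String) (out : Int × Int) : Decidable (Spec_search_extension list out) := by unfold Spec_search_extension; infer_instance

-- ===== CLAIM (what is proved, stated in full; the proofs are below) =====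
def Claim_equal_search_extension : Prop := ∀ (list : List String), Dom_search_extension list → Spec_search_extension list (search_extension list)

-- ===== LEMMAS AND PROOFS =====

theorem pv_find?_congr_mem {α : Type} (l : List α) (p q : α → Bool)
    (h : ∀ x ∈ l, p x = q x) : l.find? p = l.find? q := by
  induction l with
  | nil => rfl
  | cons a t ih =>
    simp only [List.find?]
    rw [h a (List.mem_cons_self)]
    cases q a
    · exact ih (fun x hx => h x (List.mem_cons_of_mem _ hx))
    · rfl

-- invariant for A's loop, generalized over the initial accumulator
theorem pv_fold_eq (xs : List String) (a0 k0 : Int) :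
    (PySem.List.pyRange 0 (xs.length : Int) 1).foldl
      (fun (st : Int × Int) i =>
        if PySem.Str.find (PySem.List.pyGetD xs i "") "xlsx" != -1 then (st.1 + 1, i) else st)
      (a0, k0)
    = (a0 + ((xs.filter (fun x => PySem.Str.find x "xlsx" != -1)).length : Int),
       ((PySem.List.pyRange 0 (xs.length : Int) 1).reverse.find?
         (fun i => PySem.Str.find (PySem.List.pyGetD xs i "") "xlsx" != -1)).getD k0) := by
  induction xs using List.reverseRecOn generalizing a0 k0 with
  | nil => simp [PySem.List.pyRange_one_eq_nil]
  | append_singleton xs x ih =>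
    have hlen : ((xs ++ [x]).length : Int) = (xs.length : Int) + 1 := by
      simp
    rw [hlen, PySem.List.pyRange_one_succ_right (by positivity)]
    have hget : ∀ i ∈ PySem.List.pyRange 0 (xs.length : Int) 1,
        PySem.List.pyGetD (xs ++ [x]) i "" = PySem.List.pyGetD xs i "" := by
      intro i hi
      rw [PySem.List.mem_pyRange_one] at hi
      obtain ⟨h0, h1⟩ := hi
      obtain ⟨k, rfl⟩ := Int.eq_ofNat_of_zero_le h0
      have hk : k < xs.length := by exact_mod_cast h1
      simp [PySem.List.pyGetD_natCast, List.getD, List.getElem?_append_left hk]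
    have hgetn : PySem.List.pyGetD (xs ++ [x]) (xs.length : Int) "" = x := by
      simp [PySem.List.pyGetD_natCast, List.getD]
    rw [List.foldl_append]
    rw [PySem.List.foldl_congr_mem (PySem.List.pyRange 0 (xs.length : Int) 1)
      (fun (st : Int × Int) i =>
        if PySem.Str.find (PySem.List.pyGetD (xs ++ [x]) i "") "xlsx" != -1 then (st.1 + 1, i) else st)
      (fun (st : Int × Int) i =>
        if PySem.Str.find (PySem.List.pyGetD xs i "") "xlsx" != -1 then (st.1 + 1, i) else st)
      (a0, k0)
      (by intro acc i hi; dsimp only; rw [hget i hi])]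
    rw [ih]
    simp only [List.foldl_cons, List.foldl_nil, hgetn]
    rw [List.reverse_append]
    simp only [List.reverse_singleton, List.singleton_append, List.find?_cons, hgetn]
    rw [pv_find?_congr_mem ((PySem.List.pyRange 0 (xs.length : Int) 1).reverse)
      (fun i => PySem.Str.find (PySem.List.pyGetD (xs ++ [x]) i "") "xlsx" != -1)
      (fun i => PySem.Str.find (PySem.List.pyGetD xs i "") "xlsx" != -1)
      (by intro i hi; dsimp only; rw [hget i (List.mem_reverse.mp hi)])]
    cases hpx : (PySem.Str.find x "xlsx" != -1)
    · simp only [hpx, Bool.false_eq_true, if_false, List.filter_append, List.filter_singleton]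
      simp
    · simp only [hpx, if_true, List.filter_append, List.filter_singleton]
      simp [Prod.ext_iff]
      omega

-- ===== VERDICT (by name: the statement is the Claim_ definition above) =====
theorem search_extension_spec : Claim_equal_search_extension := by
  intro list _
  unfold Spec_search_extension search_extension search_extension_alt
  rw [pv_fold_eq]
  simp
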